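-- pv_equiv track=rewrite | github.com/OhSSangHoon/blockchain | 대칭 키 암호화 숙제/2.py | autokey_cipher
-- ===== SOURCE A (Python) =====
-- def autokey_cipher(plain_text, key):
--     # A=00, B=01, ..., Z=25로 매핑
--     alphabet = 'ABCDEFGHIJKLMNOPQRSTUVWXYZ'
--     mapping = {char: str(i).zfill(2) for i, char in enumerate(alphabet)}
--     reverse_mapping = {v: k for k, v in mapping.items()}
--
--     # P's value 계산
--     p_values = [mapping[char] for char in plain_text.upper()]
--
--     # Key stream 계산
--     key_stream = [str(key).zfill(2)] + p_values[:-1]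
--
--     # C's value 계산
--     c_values = [(int(p) + int(k)) % 26 for p, k in zip(p_values, key_stream)]
--     c_values = [str(c).zfill(2) for c in c_values]
--
--     # 암호문 생성
--     cipher_text = ''.join([reverse_mapping[c] for c in c_values])
--
--     return cipher_text
-- ===== SOURCE B (Python) =====
-- def autokey_cipher(plain_text, key):
--     # Tabula recta (26x26 table) + divide-and-conquer: the ciphertext of a
--     # segment depends only on the row (previous letter value) entering it,
--     # so encrypt halves independently and concatenate.
--     tab = [[chr((r + c) % 26 + 65) for c in range(26)] for r in range(26)]
--     vals = [ord(ch) - 65 for ch in plain_text.upper()]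
--
--     def go(lo, hi, row):
--         if lo >= hi:
--             return ''
--         if hi - lo == 1:
--             return tab[row][vals[lo]]
--         mid = (lo + hi) // 2
--         return go(lo, mid, row) + go(mid, hi, vals[mid - 1])
--
--     return go(0, len(vals), key % 26)
-- ===== Notes on version B (the rewrite author's own statement) =====
-- stated objective: alternative
-- what changed: Replaced A's dict mappings, shifted key-stream list, zip and per-letter str/int round-trips by a precomputed 26x26 tabula-recta table and a divide-and-conquer recursion that encrypts each half of the text independently (the right half's row seed is the letter just before it) and concatenates.
import Mathlib
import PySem

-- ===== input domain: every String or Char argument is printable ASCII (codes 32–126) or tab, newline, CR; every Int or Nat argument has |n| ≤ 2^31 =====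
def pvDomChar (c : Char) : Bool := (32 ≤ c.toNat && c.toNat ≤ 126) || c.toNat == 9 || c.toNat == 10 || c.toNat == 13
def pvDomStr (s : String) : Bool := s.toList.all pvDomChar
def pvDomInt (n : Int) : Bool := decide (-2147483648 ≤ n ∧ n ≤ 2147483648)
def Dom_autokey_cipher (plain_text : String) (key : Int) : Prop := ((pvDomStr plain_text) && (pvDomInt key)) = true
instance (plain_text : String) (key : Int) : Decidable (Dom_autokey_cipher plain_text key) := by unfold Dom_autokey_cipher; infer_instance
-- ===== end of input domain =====

-- A = 'Autokey cipher' via mapping dicts, a shifted key-stream list, zip and per-letter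
-- str/int round-trips; B = a precomputed 26x26 tabula-recta table plus a divide-and-conquer
-- recursion over the text (alternative algorithm; same return value on letter-only plaintexts).

-- ===== PORT A =====
-- A-side helpers: the two dict comprehensions of A
def pvAlphabet : String := "ABCDEFGHIJKLMNOPQRSTUVWXYZ"

def pvMapping : PySem.Dict Char String :=
  (PySem.List.enumerate pvAlphabet.toList 0).foldl
    (fun d p => d.insert p.2 (PySem.Str.zfill (PySem.Int.toStr p.1) 2)) PySem.Dict.empty

def pvReverseMapping : PySem.Dict String Char :=
  pvMapping.items.foldl (fun d p => d.insert p.2 p.1) PySem.Dict.empty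

def autokey_cipher (plain_text : String) (key : Int) : String :=
  -- mapping[char]: KeyError on non-letters, excluded by Pre_ (getD default unreachable there)
  let p_values := (PySem.Str.upper plain_text).toList.map (fun c => (pvMapping.get? c).getD "!")
  let key_stream := [PySem.Str.zfill (PySem.Int.toStr key) 2] ++ PySem.List.slice p_values none (some (-1))
  let c_values := (p_values.zip key_stream).map
    (fun pk => PySem.Int.mod ((PySem.Int.ofStr? pk.1).getD 0 + (PySem.Int.ofStr? pk.2).getD 0) 26)
  let c_values' := c_values.map (fun c => PySem.Str.zfill (PySem.Int.toStr c) 2)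
  String.ofList (c_values'.map (fun c => (pvReverseMapping.get? c).getD ' '))

-- ===== PORT B =====
-- B-side helpers: the tabula recta (the table comprehension of Source B) and the
-- divide-and-conquer function go(lo, hi, row); list indexing tab[row][...] / vals[...]
-- is PySem.List.pyGet? (getD default unreachable inside Pre_).
def pvTab : List (List Char) :=
  (PySem.List.pyRange 0 26 1).map (fun r =>
    (PySem.List.pyRange 0 26 1).map (fun c =>
      Char.ofNat ((PySem.Int.mod (r + c) 26).toNat + 65)))

def pvValAt (vals : List Int) (i : Int) : Int := (PySem.List.pyGet? vals i).getD 0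

def pvLook (row v : Int) : Char :=
  (PySem.List.pyGet? ((PySem.List.pyGet? pvTab row).getD []) v).getD ' '

def pvGoB (vals : List Int) (lo hi row : Int) : String :=
  if _h1 : lo ≥ hi then ""
  else if _h2 : hi - lo = 1 then String.ofList [pvLook row (pvValAt vals lo)]
  else
    let mid := PySem.Int.floordiv (lo + hi) 2
    pvGoB vals lo mid row ++ pvGoB vals mid hi (pvValAt vals (mid - 1))
termination_by (hi - lo).toNat
decreasing_by
  · have h := PySem.Int.floordiv_eq_ediv_of_pos (a := lo + hi) (b := 2) (by norm_num)
    simp only [h]; omega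
  · have h := PySem.Int.floordiv_eq_ediv_of_pos (a := lo + hi) (b := 2) (by norm_num)
    simp only [h]; omega

def autokey_cipher_alt (plain_text : String) (key : Int) : String :=
  let vals := (PySem.Str.upper plain_text).toList.map (fun ch => (ch.toNat : Int) - 65)
  pvGoB vals 0 (vals.length : Int) (PySem.Int.mod key 26)

-- ===== PRECONDITION & SPEC =====
-- Pre_ excludes plaintexts containing any non-letter character: there A raises KeyError
-- (mapping has only 'A'..'Z' keys).  All keys are admitted.
def Pre_autokey_cipher (plain_text : String) (key : Int) : Prop :=
  plain_text.toList.all PySem.Chars.isalpha = true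
instance (plain_text : String) (key : Int) : Decidable (Pre_autokey_cipher plain_text key) := by
  unfold Pre_autokey_cipher; infer_instance

def pvWitness_autokey_cipher : String × Int := ("Hello", 7)

def Spec_autokey_cipher (plain_text : String) (key : Int) (out : String) : Prop :=
  out = autokey_cipher_alt plain_text key
instance (plain_text : String) (key : Int) (out : String) : Decidable (Spec_autokey_cipher plain_text key out) := by
  unfold Spec_autokey_cipher; infer_instance

-- ===== CLAIM (what is proved, stated in full; the proofs are below) =====
def Claim_equal_autokey_cipher : Prop := ∀ (plain_text : String) (key : Int), Dom_autokey_cipher plain_text key → Pre_autokey_cipher plain_text key → Spec_autokey_cipher plain_text key (autokey_cipher plain_text key)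

-- ===== LEMMAS AND PROOFS =====

-- the common reference computation: one step per letter, threading the previous value
def pvSpin : List Char → Int → List Char
  | [], _ => []
  | c :: cs, prev =>
      Char.ofNat ((PySem.Int.mod (((c.toNat : Int) - 65) + prev) 26).toNat + 65) ::
        pvSpin cs ((c.toNat : Int) - 65)

-- ---------- the int(str(key)) == key round trip ----------
-- decimal representation, most significant digit first
def pvD (n : Nat) : List Char :=
  if n < 10 then [Nat.digitChar n] else pvD (n / 10) ++ [Nat.digitChar (n % 10)]
termination_by n
decreasing_by omega

lemma pvToDigitsCore_eq : ∀ (f n : Nat) (l : List Char), n < f →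
    Nat.toDigitsCore 10 f n l = pvD n ++ l := by
  intro f
  induction f with
  | zero => intro n l h; omega
  | succ f ih =>
    intro n l h
    rw [Nat.toDigitsCore]
    by_cases h10 : n < 10
    · rw [if_pos (by omega), pvD, if_pos h10, Nat.mod_eq_of_lt h10]
      rfl
    · rw [if_neg (by omega), ih (n / 10) _ (by omega)]
      conv_rhs => rw [pvD, if_neg h10]
      simp

lemma pvToDigits_eq (n : Nat) : Nat.toDigits 10 n = pvD n := by
  rw [Nat.toDigits, pvToDigitsCore_eq (n + 1) n [] (by omega), List.append_nil]

lemma pvDigitChar_digit : ∀ m : Nat, m < 10 → (Nat.digitChar m).isDigit = true := by decide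
lemma pvDigitChar_val : ∀ m : Nat, m < 10 → (Nat.digitChar m).toNat - 48 = m := by decide

lemma pvD_digits (n : Nat) : ∀ c ∈ pvD n, c.isDigit = true := by
  induction n using pvD.induct with
  | case1 n h => rw [pvD, if_pos h]; simpa using pvDigitChar_digit n h
  | case2 n h ih =>
    rw [pvD, if_neg h]
    intro c hc
    rcases List.mem_append.mp hc with h1 | h1
    · exact ih c h1
    · simp at h1; subst h1; exact pvDigitChar_digit _ (by omega)

lemma pvD_ne_nil (n : Nat) : pvD n ≠ [] := by
  rw [pvD]; split <;> simp

lemma pvD_fold (n : Nat) : ∀ acc : Nat,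
    (pvD n).foldl (fun a c => a * 10 + (c.toNat - 48)) acc
      = acc * 10 ^ (pvD n).length + n := by
  induction n using pvD.induct with
  | case1 n h =>
    intro acc
    rw [pvD, if_pos h]
    have hv := pvDigitChar_val n h
    simp
    omega
  | case2 n h ih =>
    intro acc
    conv_lhs => rw [pvD, if_neg h]
    rw [List.foldl_append, ih]
    have hl : (pvD n).length = (pvD (n / 10)).length + 1 := by
      conv_lhs => rw [pvD, if_neg h]
      simp
    rw [hl]
    have hv := pvDigitChar_val (n % 10) (by omega)
    have h0 : '0'.toNat = 48 := rfl
    simp only [List.foldl_cons, List.foldl_nil, hv]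
    ring_nf
    omega

lemma pvGoDigits (g : List Char → Bool → Nat → Option Nat)
    (h1 : ∀ after acc, g [] after acc = if after = true then some acc else none)
    (h2 : ∀ c rest after acc, g (c :: rest) after acc =
      if c.isDigit = true then g rest true (acc * 10 + (c.toNat - 48))
      else if c = '_' ∧ after = true then
        (match rest with
         | d :: _tail => if d.isDigit = true then g rest false acc else none
         | [] => none)
      else none) :
    ∀ ds acc, (∀ c ∈ ds, c.isDigit = true) →
      g ds true acc = some (ds.foldl (fun a c => a * 10 + (c.toNat - 48)) acc) := by
  intro ds
  induction ds with
  | nil => intro acc _; rw [h1]; rfl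
  | cons c rest ih =>
    intro acc h
    rw [h2, if_pos (h c (by simp))]
    simpa using ih _ (fun x hx => h x (List.mem_cons_of_mem _ hx))

lemma pvCaptureTop (v : List Char → Option Nat) (g : List Char → Bool → Nat → Option Nat)
    (_hv0 : ∀ rest, v ('0' :: rest) = g rest true (0 * 10 + ('0'.toNat - '0'.toNat)))
    (hv : ∀ c rest, v (c :: rest) = g (c :: rest) false 0)
    (h1 : ∀ after acc, g [] after acc = if after = true then some acc else none)
    (h2 : ∀ c rest after acc, g (c :: rest) after acc =
      if c.isDigit = true then g rest true (acc * 10 + (c.toNat - 48))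
      else if c = '_' ∧ after = true then
        (match rest with
         | d :: _tail => if d.isDigit = true then g rest false acc else none
         | [] => none)
      else none)
    (f : Int → Int) (c : Char) (ds : List Char)
    (hc : c.isDigit = true) (hds : ∀ x ∈ ds, x.isDigit = true) :
    Option.map f (do let a ← v (c :: ds); pure ((a : Int)))
      = some (f (((c :: ds).foldl (fun a x => a * 10 + (x.toNat - 48)) 0 : Nat) : Int)) := by
  rw [hv, h2, if_pos hc, pvGoDigits g h1 h2 ds _ hds]
  simp [List.foldl_cons]

lemma pvNotSpace_of_digit (c : Char) (h : c.isDigit = true) : PySem.Int.isIntSpace c = false := by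
  have hb : 48 ≤ c.toNat ∧ c.toNat ≤ 57 := by
    simp [Char.isDigit] at h
    obtain ⟨h1, h2⟩ := h
    exact ⟨h1, h2⟩
  simp only [PySem.Int.isIntSpace, Bool.or_eq_false_iff, decide_eq_false_iff_not]
  refine ⟨⟨⟨⟨⟨?_, ?_⟩, ?_⟩, ?_⟩, ?_⟩, ?_⟩ <;> rintro rfl <;> exact absurd hb (by decide)

lemma pvDropWhile_self {l : List Char} (h : ∀ c ∈ l, PySem.Int.isIntSpace c = false) :
    l.dropWhile PySem.Int.isIntSpace = l := by
  cases l with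
  | nil => rfl
  | cons c cs => rw [List.dropWhile_cons, if_neg (by simp [h c (by simp)])]

lemma pvTrim (l : List Char) (h : ∀ c ∈ l, PySem.Int.isIntSpace c = false) :
    (List.dropWhile PySem.Int.isIntSpace
      (List.dropWhile PySem.Int.isIntSpace l).reverse).reverse = l := by
  rw [pvDropWhile_self h, pvDropWhile_self (by intro c hc; exact h c (List.mem_reverse.mp hc)),
    List.reverse_reverse]

lemma pvRound (k : Int) : PySem.Int.ofChars? (PySem.Int.toChars k) = some k := by
  obtain ⟨c, ds, hD⟩ : ∃ c ds, pvD k.natAbs = c :: ds := by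
    cases h : pvD k.natAbs with
    | nil => exact absurd h (pvD_ne_nil _)
    | cons a b => exact ⟨a, b, rfl⟩
  have hdig := pvD_digits k.natAbs
  rw [hD] at hdig
  have hc : c.isDigit = true := hdig c (by simp)
  have hds : ∀ x ∈ ds, x.isDigit = true := fun x hx => hdig x (by simp [hx])
  have hfold : ((c :: ds).foldl (fun a x => a * 10 + (x.toNat - 48)) 0) = k.natAbs := by
    rw [← hD, pvD_fold]; simp
  unfold PySem.Int.toChars
  by_cases hneg : k < 0
  · rw [if_pos hneg, pvToDigits_eq, hD]
    unfold PySem.Int.ofChars?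
    rw [pvTrim ('-' :: c :: ds) ?hns]
    case hns =>
      intro x hx
      rcases List.mem_cons.mp hx with rfl | hx'
      · decide
      · exact pvNotSpace_of_digit x (hdig x hx')
    refine Eq.trans (pvCaptureTop _ ?gg ?hv0 ?hv ?h1 ?h2 (fun n => -n) c ds hc hds) ?_
    case hv0 => intro rest'; rfl
    case hv => intro c' rest'; rfl
    case h1 => intro after acc; rfl
    case h2 => intro c' rest' after acc; rfl
    rw [hfold]
    simp only [Option.some.injEq]
    omega
  · rw [if_neg hneg, pvToDigits_eq, show k.toNat = k.natAbs by omega, hD]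
    unfold PySem.Int.ofChars?
    rw [pvTrim (c :: ds) ?hns2]
    case hns2 => exact fun x hx => pvNotSpace_of_digit x (hdig x hx)
    simp only [letFun]
    split
    · rename_i ds1 heq
      exact absurd hc (by rw [List.cons_eq_cons.mp heq |>.1]; decide)
    · rename_i ds1 heq
      exact absurd hc (by rw [List.cons_eq_cons.mp heq |>.1]; decide)
    · refine Eq.trans (pvCaptureTop _ ?gg2 ?hv02 ?hv2 ?h12 ?h22 (fun n => n) c ds hc hds) ?_
      case hv02 => intro rest'; rfl
      case hv2 => intro c' rest'; rfl
      case h12 => intro after acc; rfl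
      case h22 => intro c' rest' after acc; rfl
      rw [hfold]
      simp only [Option.some.injEq]
      omega

-- ---------- A-side: A's port equals pvSpin ----------

lemma pvZipTrunc {α : Type} (xs : List α) : ∀ k : α,
    xs.zip (k :: xs.dropLast) = xs.zip (k :: xs) := by
  induction xs with
  | nil => intro k; rfl
  | cons x xs ih =>
    intro k
    cases xs with
    | nil => rfl
    | cons y ys =>
      rw [List.dropLast_cons₂]
      conv_lhs => rw [List.zip_cons_cons, ih x]
      conv_rhs => rw [List.zip_cons_cons]

set_option maxRecDepth 8192 in
lemma pvMapLookup : ∀ n : Nat, n < 26 →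
    (pvMapping.get? (Char.ofNat (65 + n))).getD "!"
      = PySem.Str.zfill (PySem.Int.toStr (n : Int)) 2 := by decide

set_option maxRecDepth 8192 in
lemma pvParse26 : ∀ n : Nat, n < 26 →
    (PySem.Int.ofStr? (PySem.Str.zfill (PySem.Int.toStr (n : Int)) 2)).getD 0 = (n : Int) := by decide

set_option maxRecDepth 8192 in
lemma pvRevLookup : ∀ m : Nat, m < 26 →
    (pvReverseMapping.get? (PySem.Str.zfill (PySem.Int.toStr (m : Int)) 2)).getD ' '
      = Char.ofNat (65 + m) := by decide

lemma pvToNatOfNat : ∀ n : Nat, n < 26 → (Char.ofNat (65 + n)).toNat = 65 + n := by decide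

lemma pvCharRepr (c : Char) (h1 : 65 ≤ c.toNat) (h2 : c.toNat ≤ 90) :
    ∃ n : Nat, n < 26 ∧ c = Char.ofNat (65 + n) := by
  refine ⟨c.toNat - 65, by omega, ?_⟩
  rw [show 65 + (c.toNat - 65) = c.toNat by omega, Char.ofNat_toNat]

lemma pvMain (cs : List Char) : ∀ (kstr : String) (K : Int),
    (∀ c ∈ cs, 65 ≤ c.toNat ∧ c.toNat ≤ 90) →
    (PySem.Int.ofStr? kstr).getD 0 = K →
    ((((cs.map (fun c => (pvMapping.get? c).getD "!")).zip
        (kstr :: cs.map (fun c => (pvMapping.get? c).getD "!"))).map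
        (fun pk => PySem.Int.mod ((PySem.Int.ofStr? pk.1).getD 0 + (PySem.Int.ofStr? pk.2).getD 0) 26)).map
        (fun c => PySem.Str.zfill (PySem.Int.toStr c) 2)).map
        (fun c => (pvReverseMapping.get? c).getD ' ')
      = pvSpin cs K := by
  induction cs with
  | nil => intro kstr K _ _; rfl
  | cons c cs ih =>
    intro kstr K hmem hk
    obtain ⟨h1, h2⟩ := hmem c (by simp)
    obtain ⟨n, hn, hc⟩ := pvCharRepr c h1 h2
    have hmv : (pvMapping.get? c).getD "!" = PySem.Str.zfill (PySem.Int.toStr (n : Int)) 2 := by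
      rw [hc]; exact pvMapLookup n hn
    have hvn : (c.toNat : Int) - 65 = (n : Int) := by
      rw [hc, pvToNatOfNat n hn]; push_cast; ring
    have hmodlt : (PySem.Int.mod ((n : Int) + K) 26).toNat < 26 := by
      have h0 := PySem.Int.mod_nonneg ((n : Int) + K) (b := 26) (by norm_num)
      have h1' := PySem.Int.mod_lt ((n : Int) + K) (b := 26) (by norm_num)
      omega
    have hmodc : PySem.Int.mod ((n : Int) + K) 26
        = ((PySem.Int.mod ((n : Int) + K) 26).toNat : Int) := by
      have h0 := PySem.Int.mod_nonneg ((n : Int) + K) (b := 26) (by norm_num)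
      omega
    simp only [List.map_cons, List.zip_cons_cons, pvSpin, hvn]
    rw [ih ((pvMapping.get? c).getD "!") ((n : Int))
      (fun x hx => hmem x (List.mem_cons_of_mem _ hx))
      (by rw [hmv]; exact pvParse26 n hn)]
    rw [List.cons_eq_cons]
    refine ⟨?_, rfl⟩
    rw [hmv, hk, pvParse26 n hn, hmodc, pvRevLookup _ hmodlt]
    simp only [Int.toNat_natCast]
    exact congrArg Char.ofNat (by omega)

lemma pvUpperRange (c : Char) (h : PySem.Chars.isalpha c = true) :
    65 ≤ (PySem.Chars.upperChar c).toNat ∧ (PySem.Chars.upperChar c).toNat ≤ 90 := by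
  simp only [PySem.Chars.isalpha, PySem.Chars.isupper, PySem.Chars.islower, Bool.or_eq_true,
    Bool.and_eq_true, decide_eq_true_eq, Char.le_def, UInt32.le_iff_toNat_le] at h
  rw [show ('A'.val.toNat) = 65 from rfl, show ('Z'.val.toNat) = 90 from rfl,
      show ('a'.val.toNat) = 97 from rfl, show ('z'.val.toNat) = 122 from rfl] at h
  have hv : c.toNat = c.val.toNat := rfl
  by_cases hl : PySem.Chars.islower c = true
  · have hl' : 97 ≤ c.val.toNat ∧ c.val.toNat ≤ 122 := by
      simpa only [PySem.Chars.islower, Bool.and_eq_true, decide_eq_true_eq, Char.le_def,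
        UInt32.le_iff_toNat_le, show ('a'.val.toNat) = 97 from rfl,
        show ('z'.val.toNat) = 122 from rfl] using hl
    rw [PySem.Chars.upperChar, if_pos hl, Char.toNat_ofNat, if_pos]
    · omega
    · exact Or.inl (by omega)
  · have hu : 65 ≤ c.val.toNat ∧ c.val.toNat ≤ 90 := by
      rcases h with h | h
      · exact h
      · exact absurd (by
          simp only [PySem.Chars.islower, Bool.and_eq_true, decide_eq_true_eq, Char.le_def,
            UInt32.le_iff_toNat_le, show ('a'.val.toNat) = 97 from rfl,
            show ('z'.val.toNat) = 122 from rfl]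
          omega) hl
    rw [PySem.Chars.upperChar, if_neg hl]
    omega

lemma pvZfKeyChars (k : Int) :
    PySem.Int.ofChars? (PySem.Chars.zfill (PySem.Int.toChars k) 2)
      = PySem.Int.ofChars? (PySem.Int.toChars k) := by
  by_cases hsmall : 0 ≤ k ∧ k < 10
  · obtain ⟨hl, hr⟩ := hsmall; interval_cases k <;> decide
  · have hlen : 2 ≤ (PySem.Int.toChars k).length := by
      unfold PySem.Int.toChars
      split
      · simpa using Nat.length_toDigits_pos (b := 10) (n := k.natAbs)
      · rename_i hneg
        have h10 : 10 ≤ k.toNat := by omega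
        have hx := (Nat.length_toDigits_le_iff (b := 10) (n := k.toNat) (k := 1)
          (by norm_num) (by norm_num))
        simp only [pow_one] at hx
        omega
    have hz : PySem.Chars.zfill (PySem.Int.toChars k) 2 = PySem.Int.toChars k := by
      unfold PySem.Chars.zfill
      rw [if_pos]
      exact_mod_cast hlen
    rw [hz]

lemma pvZfKeyStr (k : Int) :
    PySem.Int.ofStr? (PySem.Str.zfill (PySem.Int.toStr k) 2)
      = PySem.Int.ofStr? (PySem.Int.toStr k) := by
  rw [PySem.Int.ofStr?.eq_1, PySem.Int.ofStr?.eq_1, PySem.Str.toList_zfill,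
      PySem.Int.toList_toStr, pvZfKeyChars]

lemma pvA_spin (plain_text : String) (key : Int)
    (hmem : ∀ c ∈ (PySem.Str.upper plain_text).toList, 65 ≤ c.toNat ∧ c.toNat ≤ 90) :
    autokey_cipher plain_text key
      = String.ofList (pvSpin (PySem.Str.upper plain_text).toList key) := by
  unfold autokey_cipher
  simp only [List.singleton_append, PySem.List.slice_to_neg_one]
  rw [pvZipTrunc, pvMain _ _ key hmem
    (by rw [pvZfKeyStr, PySem.Int.ofStr?.eq_1, PySem.Int.toList_toStr, pvRound]; rfl)]

-- ---------- B-side: B's port equals pvSpin ----------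

-- the per-value reference recursion matching B's table lookups
def pvSpinV : List Int → Int → List Char
  | [], _ => []
  | v :: vs, row => pvLook row v :: pvSpinV vs v

lemma pvSpinV_append (xs ys : List Int) : ∀ row : Int,
    pvSpinV (xs ++ ys) row = pvSpinV xs row ++ pvSpinV ys (xs.getLastD row) := by
  induction xs with
  | nil => intro row; rfl
  | cons x xs ih =>
    intro row
    simp only [List.cons_append, pvSpinV, ih x, List.getLastD_cons]

set_option maxRecDepth 8192 in
lemma pvLookEq : ∀ r : Nat, r < 26 → ∀ v : Nat, v < 26 →
    pvLook (r : Int) (v : Int) = Char.ofNat ((r + v) % 26 + 65) := by decide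

lemma pvGoB_spec (vals : List Int) : ∀ (n : Nat) (lo row : Int), 0 ≤ lo →
    lo.toNat + n ≤ vals.length →
    pvGoB vals lo (lo + (n : Int)) row
      = String.ofList (pvSpinV ((vals.drop lo.toNat).take n) row) := by
  intro n
  induction n using Nat.strong_induction_on with
  | _ n ih =>
    intro lo row hlo hlen
    match n with
    | 0 =>
      rw [pvGoB, dif_pos (by omega)]
      rfl
    | 1 =>
      rw [pvGoB]
      rw [dif_neg (by omega), dif_pos (by omega)]
      have hidx : lo.toNat < vals.length := by omega
      have hval : pvValAt vals lo = vals[lo.toNat] := by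
        unfold pvValAt
        rw [PySem.List.pyGet?_of_nonneg vals hlo, List.getElem?_eq_getElem hidx, Option.getD_some]
      have hslice : (vals.drop lo.toNat).take 1 = [vals[lo.toNat]] := by
        rw [List.take_one, List.head?_drop, List.getElem?_eq_getElem hidx]
        rfl
      rw [hval, hslice]
      rfl
    | (m + 2) =>
      rw [pvGoB]
      rw [dif_neg (by omega), dif_neg (by omega)]
      have hfd := PySem.Int.floordiv_eq_ediv_of_pos (a := lo + (lo + ((m + 2 : Nat) : Int)))
        (b := 2) (by norm_num)
      set k : Nat := (m + 2) / 2 with hk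
      have hmid : PySem.Int.floordiv (lo + (lo + ((m + 2 : Nat) : Int))) 2 = lo + (k : Int) := by
        rw [hfd]; omega
      have hk1 : 1 ≤ k := by omega
      have hkn : k < m + 2 := by omega
      simp only [hmid]
      -- left and right recursive calls via the induction hypothesis
      have hleft := ih k (by omega) lo row hlo (by omega)
      have hright := ih (m + 2 - k) (by omega) (lo + (k : Int)) (pvValAt vals (lo + (k : Int) - 1))
        (by omega) (by omega)
      rw [show lo + ((m + 2 : Nat) : Int) = (lo + (k : Int)) + ((m + 2 - k : Nat) : Int) by
        push_cast; omega] at *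
      rw [hleft, hright]
      -- split the slice
      have hsplit : (vals.drop lo.toNat).take (m + 2)
          = (vals.drop lo.toNat).take k ++ (vals.drop (lo + (k : Int)).toNat).take (m + 2 - k) := by
        set j := m + 2 - k with hjdef
        rw [show m + 2 = k + j by omega, List.take_add, List.drop_drop,
          show lo.toNat + k = (lo + (k : Int)).toNat by omega]
      rw [hsplit, pvSpinV_append]
      -- the seed of the right half is vals[lo + k - 1]
      have hlt : lo.toNat + (k - 1) < vals.length := by omega
      have hlastlen : ((vals.drop lo.toNat).take k).length = k := by
        rw [List.length_take, List.length_drop]; omega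
      have hlast : ((vals.drop lo.toNat).take k).getLastD row = vals[lo.toNat + (k - 1)] := by
        have hne : (vals.drop lo.toNat).take k ≠ [] := by
          intro hcon; rw [hcon] at hlastlen; simp at hlastlen; omega
        rw [List.getLastD_eq_getLast?, List.getLast?_eq_getElem?, hlastlen,
          List.getElem?_eq_getElem (by rw [hlastlen]; omega)]
        simp [List.getElem_take, List.getElem_drop]
      have hvalat : pvValAt vals (lo + (k : Int) - 1) = vals[lo.toNat + (k - 1)] := by
        unfold pvValAt
        rw [PySem.List.pyGet?_of_nonneg vals (by omega),
          List.getElem?_eq_getElem (by omega : (lo + (k : Int) - 1).toNat < vals.length),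
          Option.getD_some]
        congr 1
        omega
      rw [hlast, hvalat]
      exact String.ofList_append.symm

lemma pvMod26_self (v : Int) (h0 : 0 ≤ v) (h1 : v < 26) : PySem.Int.mod v 26 = v := by
  rw [PySem.Int.mod_eq_emod_of_pos (by norm_num)]; omega

lemma pvSpinV_spin (cs : List Char) : ∀ prev : Int,
    (∀ c ∈ cs, 65 ≤ c.toNat ∧ c.toNat ≤ 90) →
    pvSpinV (cs.map (fun ch => (ch.toNat : Int) - 65)) (PySem.Int.mod prev 26) = pvSpin cs prev := by
  induction cs with
  | nil => intro prev _; rfl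
  | cons c cs ih =>
    intro prev hmem
    obtain ⟨h1, h2⟩ := hmem c (by simp)
    have hv0 : (0 : Int) ≤ (c.toNat : Int) - 65 := by omega
    have hv1 : (c.toNat : Int) - 65 < 26 := by omega
    have hr0 := PySem.Int.mod_nonneg prev (b := 26) (by norm_num)
    have hr1 := PySem.Int.mod_lt prev (b := 26) (by norm_num)
    simp only [List.map_cons, pvSpinV, pvSpin]
    refine List.cons_eq_cons.mpr ⟨?_, ?_⟩
    · -- head: table lookup = modular arithmetic
      have hrv : PySem.Int.mod prev 26 = (((PySem.Int.mod prev 26).toNat : Nat) : Int) := by omega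
      have hvv : (c.toNat : Int) - 65 = ((c.toNat - 65 : Nat) : Int) := by omega
      rw [hrv, hvv, pvLookEq _ (by omega) _ (by omega)]
      congr 1
      have h1' := PySem.Int.mod_eq_emod_of_pos
        (a := ((c.toNat - 65 : Nat) : Int) + prev) (b := 26) (by norm_num)
      have h2' := PySem.Int.mod_eq_emod_of_pos (a := prev) (b := 26) (by norm_num)
      omega
    · -- tail: the next row is the raw value, already reduced
      have htail := ih ((c.toNat : Int) - 65) (fun x hx => hmem x (List.mem_cons_of_mem _ hx))
      rwa [pvMod26_self _ hv0 hv1] at htail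

lemma pvB_spin (plain_text : String) (key : Int)
    (hmem : ∀ c ∈ (PySem.Str.upper plain_text).toList, 65 ≤ c.toNat ∧ c.toNat ≤ 90) :
    autokey_cipher_alt plain_text key
      = String.ofList (pvSpin (PySem.Str.upper plain_text).toList key) := by
  unfold autokey_cipher_alt
  show pvGoB ((PySem.Str.upper plain_text).toList.map (fun ch => (ch.toNat : Int) - 65)) 0
      ((((PySem.Str.upper plain_text).toList.map (fun ch => (ch.toNat : Int) - 65)).length : Nat) : Int)
      (PySem.Int.mod key 26)
    = String.ofList (pvSpin (PySem.Str.upper plain_text).toList key)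
  set cs := (PySem.Str.upper plain_text).toList with hcs
  set vals := cs.map (fun ch => (ch.toNat : Int) - 65) with hvals
  have h0 : ((vals.length : Nat) : Int) = 0 + ((vals.length : Nat) : Int) := by omega
  rw [h0, pvGoB_spec vals vals.length 0 _ (by omega) (by simp)]
  simp only [Int.toNat_zero, List.drop_zero, List.take_length]
  exact congrArg String.ofList (pvSpinV_spin cs key hmem)

-- ===== VERDICT (by name: the statement is the Claim_ definition above) =====
set_option maxHeartbeats 1000000 in
theorem autokey_cipher_spec : Claim_equal_autokey_cipher := by
  intro plain_text key _hdom hpre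
  unfold Pre_autokey_cipher at hpre
  have hmem : ∀ c ∈ (PySem.Str.upper plain_text).toList, 65 ≤ c.toNat ∧ c.toNat ≤ 90 := by
    intro c hcmem
    rw [PySem.Str.toList_upper, PySem.Chars.upper, List.mem_map] at hcmem
    obtain ⟨a, ha, rfl⟩ := hcmem
    exact pvUpperRange a (by
      rw [List.all_eq_true] at hpre
      exact hpre a ha)
  unfold Spec_autokey_cipher
  rw [pvA_spin plain_text key hmem, pvB_spin plain_text key hmem]
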